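-- pv_equiv track=rewrite | github.com/NTKhang2002/P-O3ESATMeetingOwl | MAINPORGRAMBAM/koppelen.py | koppelen
-- ===== SOURCE A (Python) =====
-- def koppelen(xhanden, xgezichten):
--     gekoppeld = []
--     for i in range(len(xhanden)):
--         min_afstand = 10000000000000000
--         index = 0
--         for xgezicht in xgezichten:
--             afstand = abs(xhanden[i] - xgezicht)
--             if afstand <= min_afstand:
--                 min_afstand = afstand
--                 juiste_gezicht = index
--                 index += 1
--             else:
--                 index += 1
--         ok = (xhanden[i], xgezichten[juiste_gezicht])
--         gekoppeld.append(ok)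
--     return gekoppeld #geeft een lijst met tuples (index_xhanden, index_xgezichten)
-- ===== SOURCE B (Python) =====
-- def koppelen(xhanden, xgezichten):
--     # sorted distinct face values + last-occurrence index per value + binary search per hand
--     vals = sorted(set(xgezichten))
--     last = {}
--     for i, v in enumerate(xgezichten):
--         last[v] = i
--     n = len(vals)
--     gekoppeld = []
--     for x in xhanden:
--         lo, hi = 0, n
--         while lo < hi:
--             mid = (lo + hi) // 2
--             if vals[mid] < x:
--                 lo = mid + 1
--             else:
--                 hi = mid
--         if lo == 0:
--             best = vals[0]
--         elif lo == n:
--             best = vals[n - 1]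
--         else:
--             below, above = vals[lo - 1], vals[lo]
--             if x - below < above - x:
--                 best = below
--             elif above - x < x - below:
--                 best = above
--             else:
--                 best = above if last[above] > last[below] else below
--         gekoppeld.append((x, best))
--     return gekoppeld
-- ===== Notes on version B (the rewrite author's own statement) =====
-- stated objective: faster
-- what changed: Replaces the per-hand linear argmin scan over all faces by a one-time sorted list of distinct face values plus a last-occurrence-index dict, then a binary search per hand choosing between the two neighbouring values (tie broken by the larger last index, matching A's <=-update rule).
import Mathlib
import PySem

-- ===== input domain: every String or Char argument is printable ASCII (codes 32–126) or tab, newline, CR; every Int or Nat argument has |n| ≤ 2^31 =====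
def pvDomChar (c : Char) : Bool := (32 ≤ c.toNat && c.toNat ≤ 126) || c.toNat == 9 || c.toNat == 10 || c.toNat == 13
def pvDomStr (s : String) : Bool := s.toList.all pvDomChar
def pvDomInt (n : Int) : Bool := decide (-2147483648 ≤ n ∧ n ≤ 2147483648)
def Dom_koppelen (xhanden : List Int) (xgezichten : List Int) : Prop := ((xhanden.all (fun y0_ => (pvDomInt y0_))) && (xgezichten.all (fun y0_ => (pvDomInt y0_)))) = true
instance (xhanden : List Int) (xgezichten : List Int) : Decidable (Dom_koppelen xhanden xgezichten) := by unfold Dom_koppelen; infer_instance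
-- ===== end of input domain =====

-- B replaces A's per-hand linear scan over all faces by sorted distinct values + a
-- last-occurrence dict + a binary search per hand (objective: faster, asymptotic).


-- ===== PORT A =====
-- inner 'for xgezicht in xgezichten' loop: state (min_afstand, juiste_gezicht?, index);
-- juiste_gezicht starts unbound (none = the NameError Pre_ excludes)
def pvInnerA (x : Int) (g : List Int) : Int × Option Int × Int :=
  g.foldl (fun st v =>
    let afstand := |x - v|
    if afstand ≤ st.1 then (afstand, some st.2.2, st.2.2 + 1)
    else (st.1, st.2.1, st.2.2 + 1))
    (10000000000000000, none, 0)

def koppelen (xhanden : List Int) (xgezichten : List Int) : List (Int × Int) :=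
  (PySem.List.pyRange 0 (xhanden.length : Int) 1).foldl (fun gekoppeld i =>
    -- xhanden[i]: i ∈ range(len(xhanden)), always in range, so pyGetD is exact
    let x := PySem.List.pyGetD xhanden i 0
    match (pvInnerA x xgezichten).2.1 with
    | some j => gekoppeld ++ [(x, PySem.List.pyGetD xgezichten j 0)]  -- exact: j is a valid index
    | none => gekoppeld   -- Python raises NameError here; excluded by Pre_
    ) []

-- ===== PORT B =====
-- the hand-written bisect_left while-loop of Source B (vals[mid]: 0 ≤ mid < hi ≤ len vals, exact)
def pvBisect (vals : List Int) (x : Int) (lo hi : Nat) : Nat :=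
  if _h : lo < hi then
    let mid := (lo + hi) / 2
    if vals.getD mid 0 < x then pvBisect vals x (mid + 1) hi
    else pvBisect vals x lo mid
  else lo
termination_by hi - lo

-- the body of Source B's 'for x in xhanden' loop
def pvBestB (vals : List Int) (last : PySem.Dict Int Int) (n : Nat) (x : Int) : Int :=
  let lo := pvBisect vals x 0 n
  if lo = 0 then vals.getD 0 0
  else if lo = n then vals.getD (n - 1) 0
  else
    let below := vals.getD (lo - 1) 0
    let above := vals.getD lo 0
    if x - below < above - x then below
    else if above - x < x - below then above
    else if last.getD above 0 > last.getD below 0 then above else below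

def koppelen_alt (xhanden : List Int) (xgezichten : List Int) : List (Int × Int) :=
  let vals := PySem.List.sorted (PySem.Set.ofList xgezichten) (fun v => v) false
  let last := (PySem.List.enumerate xgezichten 0).foldl
    (fun d p => d.insert p.2 p.1) (PySem.Dict.empty : PySem.Dict Int Int)
  xhanden.foldl (fun gekoppeld x =>
    gekoppeld ++ [(x, pvBestB vals last vals.length x)]) []

-- ===== PRECONDITION & SPEC =====
-- Pre_ excludes only inputs where A raises NameError (and B IndexError):
-- a non-empty hand list with an empty face list.
def Pre_koppelen (xhanden : List Int) (xgezichten : List Int) : Prop :=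
  xgezichten ≠ [] ∨ xhanden = []
instance (xhanden : List Int) (xgezichten : List Int) : Decidable (Pre_koppelen xhanden xgezichten) := by unfold Pre_koppelen; infer_instance

def pvWitness_koppelen : List Int × List Int := ([3, -1], [0, 2, 2, 7])

def Spec_koppelen (xhanden : List Int) (xgezichten : List Int) (out : List (Int × Int)) : Prop := out = koppelen_alt xhanden xgezichten
instance (xhanden : List Int) (xgezichten : List Int) (out : List (Int × Int)) : Decidable (Spec_koppelen xhanden xgezichten out) := by unfold Spec_koppelen; infer_instance

-- ===== CLAIM (what is proved, stated in full; the proofs are below) =====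
def Claim_equal_koppelen : Prop := ∀ (xhanden : List Int) (xgezichten : List Int), Dom_koppelen xhanden xgezichten → Pre_koppelen xhanden xgezichten → Spec_koppelen xhanden xgezichten (koppelen xhanden xgezichten)

-- ===== LEMMAS AND PROOFS =====

def pvLa (x : Int) : List Int → Nat
  | [] => 0
  | [_] => 0
  | v :: w :: t =>
    if |x - v| < |x - (w :: t).getD (pvLa x (w :: t)) 0| then 0 else pvLa x (w :: t) + 1

theorem pvLa_spec (x : Int) : ∀ (g : List Int), g ≠ [] →
    pvLa x g < g.length ∧
    (∀ i, i < g.length → |x - g.getD (pvLa x g) 0| ≤ |x - g.getD i 0|) ∧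
    (∀ i, i < g.length → |x - g.getD i 0| = |x - g.getD (pvLa x g) 0| → i ≤ pvLa x g) := by
  intro g
  induction g with
  | nil => intro h; exact absurd rfl h
  | cons v t ih =>
    intro _
    cases t with
    | nil =>
      refine ⟨by simp [pvLa], ?_, ?_⟩ <;> intro i hi <;> simp at hi <;> simp [hi, pvLa]
    | cons w s =>
      obtain ⟨h1, h2, h3⟩ := ih (by simp)
      by_cases hc : |x - v| < |x - (w :: s).getD (pvLa x (w :: s)) 0|
      · have hla : pvLa x (v :: w :: s) = 0 := by simp only [pvLa]; rw [if_pos hc]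
        refine ⟨by simp [hla], ?_, ?_⟩
        · intro i hi
          rcases Nat.eq_zero_or_pos i with h0 | h0
          · simp [hla, h0]
          · have : |x - (w :: s).getD (pvLa x (w :: s)) 0| ≤ |x - (w :: s).getD (i - 1) 0| :=
              h2 (i - 1) (by simp at hi ⊢; omega)
            have hg : (v :: w :: s).getD i 0 = (w :: s).getD (i - 1) 0 := by
              cases i with
              | zero => omega
              | succ n => simp
            rw [hla, hg]
            simp only [List.getD_cons_zero]
            omega
        · intro i hi heq
          rcases Nat.eq_zero_or_pos i with h0 | h0
          · omega
          · exfalso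
            have hg : (v :: w :: s).getD i 0 = (w :: s).getD (i - 1) 0 := by
              cases i with
              | zero => omega
              | succ n => simp
            rw [hla] at heq
            simp only [List.getD_cons_zero] at heq
            have hmin := h2 (i - 1) (by simp at hi ⊢; omega)
            rw [hg] at heq
            simp only [List.getD_eq_getElem?_getD] at hmin heq hc
            omega
      · have hla : pvLa x (v :: w :: s) = pvLa x (w :: s) + 1 := by simp only [pvLa]; rw [if_neg hc]
        have hgla : (v :: w :: s).getD (pvLa x (v :: w :: s)) 0
            = (w :: s).getD (pvLa x (w :: s)) 0 := by rw [hla]; simp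
        refine ⟨by simp [hla]; simpa using h1, ?_, ?_⟩
        · intro i hi
          rw [hgla]
          rcases Nat.eq_zero_or_pos i with h0 | h0
          · rw [h0]; simp only [List.getD_cons_zero]; omega
          · have hg : (v :: w :: s).getD i 0 = (w :: s).getD (i - 1) 0 := by
              cases i with
              | zero => omega
              | succ n => simp
            rw [hg]
            exact h2 (i - 1) (by simp at hi ⊢; omega)
        · intro i hi heq
          rw [hgla] at heq
          rcases Nat.eq_zero_or_pos i with h0 | h0
          · omega
          · have hg : (v :: w :: s).getD i 0 = (w :: s).getD (i - 1) 0 := by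
              cases i with
              | zero => omega
              | succ n => simp
            rw [hg] at heq
            have := h3 (i - 1) (by simp at hi ⊢; omega) heq
            omega

theorem pvFoldA_eq (x : Int) : ∀ (t : List Int) (d0 : Int) (o0 : Option Int) (k : Int), t ≠ [] →
    t.foldl (fun st v =>
      let afstand := |x - v|
      if afstand ≤ st.1 then (afstand, some st.2.2, st.2.2 + 1)
      else (st.1, st.2.1, st.2.2 + 1)) (d0, o0, k)
    = if |x - t.getD (pvLa x t) 0| ≤ d0 then
        (|x - t.getD (pvLa x t) 0|, some (k + (pvLa x t : Int)), k + (t.length : Int))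
      else (d0, o0, k + (t.length : Int)) := by
  intro t
  induction t with
  | nil => intro _ _ _ h; exact absurd rfl h
  | cons v s ih =>
    intro d0 o0 k _
    cases s with
    | nil =>
      simp only [List.foldl_cons, List.foldl_nil, pvLa, List.getD_cons_zero, List.length_cons,
        List.length_nil]
      split_ifs with h
      · simp
      · simp
    | cons w u =>
      have hne : w :: u ≠ [] := by simp
      rw [List.foldl_cons]
      have hbeta : (let afstand := |x - v|
          if afstand ≤ (d0, o0, k).1 then (afstand, some (d0, o0, k).2.2, (d0, o0, k).2.2 + 1)
          else ((d0, o0, k).1, (d0, o0, k).2.1, (d0, o0, k).2.2 + 1))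
          = if |x - v| ≤ d0 then (|x - v|, some k, k + 1) else (d0, o0, k + 1) := rfl
      rw [hbeta]
      by_cases hd : |x - v| ≤ d0
      · rw [if_pos hd, ih _ _ _ hne]
        by_cases hc : |x - v| < |x - (w :: u).getD (pvLa x (w :: u)) 0|
        · have hla : pvLa x (v :: w :: u) = 0 := by simp only [pvLa]; rw [if_pos hc]
          rw [hla]
          simp only [List.getD_cons_zero]
          rw [if_neg (by omega), if_pos hd]
          simp only [Prod.mk.injEq, List.length_cons]
          and_intros <;> first | trivial | (push_cast; ring_nf)
        · have hla : pvLa x (v :: w :: u) = pvLa x (w :: u) + 1 := by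
            simp only [pvLa]; rw [if_neg hc]
          rw [hla]
          have hgla : (v :: w :: u).getD (pvLa x (w :: u) + 1) 0
              = (w :: u).getD (pvLa x (w :: u)) 0 := by simp
          rw [hgla, if_pos (by omega), if_pos (by omega)]
          simp only [Prod.mk.injEq, List.length_cons]
          and_intros <;> first | trivial | (push_cast; ring_nf)
      · rw [if_neg hd, ih _ _ _ hne]
        by_cases hc : |x - v| < |x - (w :: u).getD (pvLa x (w :: u)) 0|
        · have hla : pvLa x (v :: w :: u) = 0 := by simp only [pvLa]; rw [if_pos hc]
          rw [hla]
          simp only [List.getD_cons_zero]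
          rw [if_neg (by omega), if_neg hd]
          simp only [Prod.mk.injEq, List.length_cons]
          and_intros <;> first | trivial | (push_cast; ring_nf)
        · have hla : pvLa x (v :: w :: u) = pvLa x (w :: u) + 1 := by
            simp only [pvLa]; rw [if_neg hc]
          rw [hla]
          have hgla : (v :: w :: u).getD (pvLa x (w :: u) + 1) 0
              = (w :: u).getD (pvLa x (w :: u)) 0 := by simp
          rw [hgla]
          by_cases he : |x - (w :: u).getD (pvLa x (w :: u)) 0| ≤ d0
          · rw [if_pos he, if_pos he]
            simp only [Prod.mk.injEq, List.length_cons]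
            and_intros <;> first | trivial | (push_cast; ring_nf)
          · rw [if_neg he, if_neg he]
            simp only [Prod.mk.injEq, List.length_cons]
            and_intros <;> first | trivial | (push_cast; ring_nf)

theorem pvGetD_mono (l : List Int) (hs : l.Pairwise (· ≤ ·)) (i j : Nat) (hij : i ≤ j)
    (hj : j < l.length) : l.getD i 0 ≤ l.getD j 0 := by
  rcases Nat.eq_or_lt_of_le hij with h | h
  · rw [h]
  · rw [List.getD_eq_getElem _ _ (by omega), List.getD_eq_getElem _ _ hj]
    exact List.pairwise_iff_getElem.mp hs i j (by omega) hj h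

theorem pvBisect_spec (vals : List Int) (x : Int) (hs : vals.Pairwise (· ≤ ·)) :
    ∀ (n lo hi : Nat), hi - lo ≤ n → lo ≤ hi → hi ≤ vals.length →
      lo ≤ pvBisect vals x lo hi ∧ pvBisect vals x lo hi ≤ hi ∧
      (∀ j, j < pvBisect vals x lo hi → lo ≤ j → vals.getD j 0 < x) ∧
      (∀ j, pvBisect vals x lo hi ≤ j → j < hi → x ≤ vals.getD j 0) := by
  intro n
  induction n with
  | zero =>
    intro lo hi hfuel hlh hhi
    have : ¬ lo < hi := by omega
    rw [pvBisect, dif_neg this]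
    exact ⟨le_refl _, hlh, fun j h1 h2 => by omega, fun j h1 h2 => by omega⟩
  | succ n ih =>
    intro lo hi hfuel hlh hhi
    rw [pvBisect]
    by_cases h : lo < hi
    · rw [dif_pos h]
      simp only []
      by_cases hv : vals.getD ((lo + hi) / 2) 0 < x
      · rw [if_pos hv]
        obtain ⟨a, b, c, d⟩ := ih ((lo + hi) / 2 + 1) hi (by omega) (by omega) hhi
        refine ⟨by omega, b, ?_, d⟩
        intro j hj hlj
        by_cases hjm : (lo + hi) / 2 + 1 ≤ j
        · exact c j hj hjm
        · have := pvGetD_mono vals hs j ((lo + hi) / 2) (by omega) (by omega)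
          omega
      · rw [if_neg hv]
        obtain ⟨a, b, c, d⟩ := ih lo ((lo + hi) / 2) (by omega) (by omega) (by omega)
        refine ⟨a, by omega, c, ?_⟩
        intro j hj hjhi
        by_cases hjm : j < (lo + hi) / 2
        · exact d j hj hjm
        · have := pvGetD_mono vals hs ((lo + hi) / 2) j (by omega) (by omega)
          omega
    · rw [dif_neg h]
      exact ⟨le_refl _, hlh, fun j h1 h2 => by omega, fun j h1 h2 => by omega⟩

-- pvLastD g = the 'last' dict of Source B
theorem pvLastD_build (g : List Int) (w : Int) :
    (PySem.List.enumerate (g ++ [w]) 0).foldl (fun d p => d.insert p.2 p.1)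
      (PySem.Dict.empty : PySem.Dict Int Int)
    = ((PySem.List.enumerate g 0).foldl (fun d p => d.insert p.2 p.1)
        (PySem.Dict.empty : PySem.Dict Int Int)).insert w (g.length : Int) := by
  rw [PySem.List.enumerate_append, List.foldl_append]
  simp [PySem.List.enumerate]

theorem pvLastD_spec (g : List Int) : ∀ v ∈ g,
    ∃ m : Nat, m < g.length ∧ g.getD m 0 = v ∧
      (∀ i, i < g.length → g.getD i 0 = v → i ≤ m) ∧
      ((PySem.List.enumerate g 0).foldl (fun d p => d.insert p.2 p.1)
        (PySem.Dict.empty : PySem.Dict Int Int)).getD v 0 = (m : Int) := by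
  induction g using List.reverseRecOn with
  | nil => intro v hv; simp at hv
  | append_singleton g w ih =>
    intro v hv
    rw [pvLastD_build]
    by_cases hvw : v = w
    · subst hvw
      refine ⟨g.length, by simp, ?_, ?_, ?_⟩
      · rw [List.getD_append_right _ _ _ _ (le_refl _)]
        simp
      · intro i hi _
        simp at hi
        omega
      · rw [PySem.Dict.getD_insert_self]
    · have hvg : v ∈ g := by
        rcases List.mem_append.mp hv with h | h
        · exact h
        · simp at h; exact absurd h hvw
      obtain ⟨m, hm1, hm2, hm3, hm4⟩ := ih v hvg
      refine ⟨m, by simp; omega, ?_, ?_, ?_⟩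
      · rw [List.getD_append _ _ _ _ hm1]
        exact hm2
      · intro i hi hgi
        simp at hi
        by_cases hil : i < g.length
        · rw [List.getD_append _ _ _ _ hil] at hgi
          exact hm3 i hil hgi
        · exfalso
          have : i = g.length := by omega
          rw [this, List.getD_append_right _ _ _ _ (le_refl _)] at hgi
          simp at hgi
          exact hvw hgi.symm
      · rw [PySem.Dict.getD_insert_of_ne _ _ _ hvw]
        exact hm4

-- index of a member, in getD form
theorem pvMem_getD (l : List Int) (u : Int) (hu : u ∈ l) :
    ∃ i, i < l.length ∧ l.getD i 0 = u := by
  obtain ⟨i, hi, h⟩ := List.mem_iff_getElem.mp hu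
  exact ⟨i, hi, by rw [List.getD_eq_getElem _ _ hi]; exact h⟩

theorem pvGetD_mem (l : List Int) (i : Nat) (hi : i < l.length) : l.getD i 0 ∈ l := by
  rw [List.getD_eq_getElem _ _ hi]
  exact List.getElem_mem hi

theorem pvGetD_smono (l : List Int) (hs : l.Pairwise (· < ·)) (i j : Nat) (hij : i < j)
    (hj : j < l.length) : l.getD i 0 < l.getD j 0 := by
  rw [List.getD_eq_getElem _ _ (by omega), List.getD_eq_getElem _ _ hj]
  exact List.pairwise_iff_getElem.mp hs i j (by omega) hj hij

-- B's per-hand value is exactly the value at A's last-argmin index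
theorem pvBestB_eq (g : List Int) (hg : g ≠ []) (x : Int) :
    pvBestB (PySem.List.sorted (PySem.Set.ofList g) (fun v => v) false)
      ((PySem.List.enumerate g 0).foldl (fun d p => d.insert p.2 p.1)
        (PySem.Dict.empty : PySem.Dict Int Int))
      (PySem.List.sorted (PySem.Set.ofList g) (fun v => v) false).length x
    = g.getD (pvLa x g) 0 := by
  set vals := PySem.List.sorted (PySem.Set.ofList g) (fun v => v) false with hvals
  set lastd := (PySem.List.enumerate g 0).foldl (fun d p => d.insert p.2 p.1)
    (PySem.Dict.empty : PySem.Dict Int Int) with hlastd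
  have hstrict : vals.Pairwise (· < ·) := PySem.List.sorted_ofList_pairwise_lt g
  have hle : vals.Pairwise (· ≤ ·) := hstrict.imp (fun h => le_of_lt h)
  have hmem : ∀ u : Int, u ∈ vals ↔ u ∈ g := fun u => by
    rw [hvals, PySem.List.mem_sorted, PySem.Set.mem_ofList]
  obtain ⟨hla1, hla2, hla3⟩ := pvLa_spec x g hg
  set vstar := g.getD (pvLa x g) 0 with hvstar
  have hvg : vstar ∈ g := pvGetD_mem g _ hla1
  have hP2 : ∀ u ∈ g, |x - vstar| ≤ |x - u| := by
    intro u hu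
    obtain ⟨i, hi, hgi⟩ := pvMem_getD g u hu
    have h := hla2 i hi
    rw [hgi] at h
    exact h
  obtain ⟨js, hjs, hjsv⟩ := pvMem_getD vals vstar ((hmem vstar).mpr hvg)
  have hn : 0 < vals.length := by omega
  obtain ⟨hr1, hr2, hr3, hr4⟩ :=
    pvBisect_spec vals x hle vals.length 0 vals.length (by omega) (by omega) (le_refl _)
  simp only [pvBestB]
  set r := pvBisect vals x 0 vals.length with hrdef
  by_cases h0 : r = 0
  · rw [if_pos h0]
    rcases Nat.eq_zero_or_pos js with hjz | hjz
    · rw [← hjsv, hjz]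
    · exfalso
      have h0x : x ≤ vals.getD 0 0 := hr4 0 (by omega) (by omega)
      have hjx : x ≤ vals.getD js 0 := hr4 js (by omega) hjs
      have hlt : vals.getD 0 0 < vals.getD js 0 := pvGetD_smono vals hstrict 0 js hjz hjs
      have hP := hP2 _ ((hmem _).mp (pvGetD_mem vals 0 hn))
      have e1 : |x - vals.getD 0 0| = vals.getD 0 0 - x := by
        rw [abs_sub_comm]; exact abs_of_nonneg (by omega)
      have e2 : |x - vstar| = vstar - x := by
        rw [abs_sub_comm]; exact abs_of_nonneg (by omega)
      rw [e1, e2] at hP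
      omega
  · rw [if_neg h0]
    by_cases hrn0 : r = vals.length
    · rw [if_pos hrn0]
      rcases Nat.lt_or_ge js (vals.length - 1) with hjz | hjz
      · exfalso
        have hlt : vals.getD js 0 < vals.getD (vals.length - 1) 0 :=
          pvGetD_smono vals hstrict js (vals.length - 1) hjz (by omega)
        have hx1 : vals.getD (vals.length - 1) 0 < x := hr3 (vals.length - 1) (by omega) (by omega)
        have hxj : vals.getD js 0 < x := hr3 js (by omega) (by omega)
        have hP := hP2 _ ((hmem _).mp (pvGetD_mem vals (vals.length - 1) (by omega)))
        have e1 : |x - vals.getD (vals.length - 1) 0| = x - vals.getD (vals.length - 1) 0 :=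
          abs_of_nonneg (by omega)
        have e2 : |x - vstar| = x - vstar := by
          rw [← hjsv]; exact abs_of_nonneg (by omega)
        rw [e1, e2] at hP
        omega
      · rw [← hjsv, show js = vals.length - 1 from by omega]
    · rw [if_neg hrn0]
      have h0r : 0 < r := by omega
      have hrn : r < vals.length := by omega
      set below := vals.getD (r - 1) 0 with hbelow
      set above := vals.getD r 0 with habove
      have hbel : below < x := hr3 (r - 1) (by omega) (by omega)
      have habo : x ≤ above := hr4 r (by omega) hrn
      have hbmem : below ∈ g := (hmem _).mp (pvGetD_mem vals (r - 1) (by omega))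
      have hamem : above ∈ g := (hmem _).mp (pvGetD_mem vals r hrn)
      have hPb := hP2 _ hbmem
      have hPa := hP2 _ hamem
      have eb : |x - below| = x - below := abs_of_nonneg (by omega)
      have ea : |x - above| = above - x := by
        rw [abs_sub_comm]; exact abs_of_nonneg (by omega)
      have hdisj : (vstar = below ∧ |x - vstar| = x - below) ∨
          (vstar = above ∧ |x - vstar| = above - x) := by
        rcases Nat.lt_or_ge js r with hcase | hcase
        · left
          have hsx : vstar < x := by rw [← hjsv]; exact hr3 js hcase (by omega)
          have hsle : vstar ≤ below := by
            rw [← hjsv, hbelow]; exact pvGetD_mono vals hle js (r - 1) (by omega) (by omega)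
          have es : |x - vstar| = x - vstar := abs_of_nonneg (by omega)
          rw [eb] at hPb
          rw [es] at hPb ⊢
          constructor <;> omega
        · right
          have hsx : x ≤ vstar := by rw [← hjsv]; exact hr4 js hcase hjs
          have hsge : above ≤ vstar := by
            rw [← hjsv, habove]; exact pvGetD_mono vals hle r js hcase hjs
          have es : |x - vstar| = vstar - x := by
            rw [abs_sub_comm]; exact abs_of_nonneg (by omega)
          rw [ea] at hPa
          rw [es] at hPa ⊢
          constructor <;> omega
      by_cases hlt1 : x - below < above - x
      · rw [if_pos hlt1]
        rcases hdisj with ⟨hveq, _⟩ | ⟨hveq, hvd⟩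
        · rw [hveq]
        · exfalso
          rw [eb, hvd] at hPb
          omega
      · rw [if_neg hlt1]
        by_cases hlt2 : above - x < x - below
        · rw [if_pos hlt2]
          rcases hdisj with ⟨hveq, hvd⟩ | ⟨hveq, _⟩
          · exfalso
            rw [ea, hvd] at hPa
            omega
          · rw [hveq]
        · rw [if_neg hlt2]
          have hba : below < above := pvGetD_smono vals hstrict (r - 1) r (by omega) hrn
          obtain ⟨mb, hmb1, hmb2, hmb3, hmb4⟩ := pvLastD_spec g below hbmem
          obtain ⟨ma, hma1, hma2, hma3, hma4⟩ := pvLastD_spec g above hamem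
          have hdb : |x - vstar| = x - below := by
            rcases hdisj with ⟨_, h⟩ | ⟨_, h⟩
            · exact h
            · rw [h]; omega
          have hmbla : mb ≤ pvLa x g := hla3 mb hmb1 (by rw [hmb2, eb, hdb])
          have hmala : ma ≤ pvLa x g := hla3 ma hma1 (by rw [hma2, ea, hdb]; omega)
          have hanb : ma ≠ mb := by
            intro h
            rw [h, hmb2] at hma2
            omega
          rcases hdisj with ⟨hveq, _⟩ | ⟨hveq, _⟩
          · have hlab : pvLa x g ≤ mb := hmb3 (pvLa x g) hla1 (by rw [← hvstar, hveq])
            have hcond : ¬ (lastd.getD above 0 > lastd.getD below 0) := by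
              rw [hma4, hmb4]
              have : ma < mb := by omega
              omega
            rw [if_neg hcond, hveq]
          · have hlaa : pvLa x g ≤ ma := hma3 (pvLa x g) hla1 (by rw [← hvstar, hveq])
            have hcond : lastd.getD above 0 > lastd.getD below 0 := by
              rw [hma4, hmb4]
              have : mb < ma := by omega
              omega
            rw [if_pos hcond, hveq]

-- A as a map (inside Pre_ and Dom_)
theorem koppelen_eq_map (xh g : List Int) (hg : g ≠ [])
    (hbg : ∀ y ∈ g, -2147483648 ≤ y ∧ y ≤ 2147483648)
    (hbx : ∀ y ∈ xh, -2147483648 ≤ y ∧ y ≤ 2147483648) :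
    koppelen xh g = xh.map (fun x => (x, g.getD (pvLa x g) 0)) := by
  have h1 : koppelen xh g = xh.foldl (fun acc x =>
      match (pvInnerA x g).2.1 with
      | some j => acc ++ [(x, PySem.List.pyGetD g j 0)]
      | none => acc) [] := by
    unfold koppelen
    exact PySem.List.foldl_pyRange_zero_pyGetD' xh 0 (fun acc x =>
      match (pvInnerA x g).2.1 with
      | some j => acc ++ [(x, PySem.List.pyGetD g j 0)]
      | none => acc) []
  rw [h1, PySem.List.foldl_congr_mem' xh _
    (fun acc x => acc ++ [(x, g.getD (pvLa x g) 0)]) [] ?_,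
    PySem.List.foldl_append_singleton_eq_map]
  · simp
  · intro x hx acc
    have hlt := (pvLa_spec x g hg).1
    have hcond : |x - g.getD (pvLa x g) 0| ≤ 10000000000000000 := by
      have hbb := hbg _ (pvGetD_mem g (pvLa x g) hlt)
      have hxx := hbx _ hx
      rw [abs_le]
      omega
    unfold pvInnerA
    rw [pvFoldA_eq x g 10000000000000000 none 0 hg, if_pos hcond]
    simp [PySem.List.pyGetD_natCast]

theorem koppelen_alt_eq_map (xh g : List Int) :
    koppelen_alt xh g = xh.map (fun x =>
      (x, pvBestB (PySem.List.sorted (PySem.Set.ofList g) (fun v => v) false)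
        ((PySem.List.enumerate g 0).foldl (fun d p => d.insert p.2 p.1)
          (PySem.Dict.empty : PySem.Dict Int Int))
        (PySem.List.sorted (PySem.Set.ofList g) (fun v => v) false).length x)) := by
  unfold koppelen_alt
  rw [PySem.List.foldl_append_singleton_eq_map]
  simp

-- ===== VERDICT (by name: the statement is the Claim_ definition above) =====
theorem koppelen_spec : Claim_equal_koppelen := by
  intro xh g hdom hpre
  unfold Spec_koppelen
  by_cases hg : g = []
  · have hxh : xh = [] := by
      rcases hpre with h | h
      · exact absurd hg h
      · exact h
    subst hxh
    rfl
  · have hb : ∀ y ∈ xh, (-2147483648 ≤ y ∧ y ≤ 2147483648) := by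
      unfold Dom_koppelen at hdom
      simp [pvDomInt, List.all_eq_true] at hdom
      exact fun y hy => hdom.1 y hy
    have hbg : ∀ y ∈ g, (-2147483648 ≤ y ∧ y ≤ 2147483648) := by
      unfold Dom_koppelen at hdom
      simp [pvDomInt, List.all_eq_true] at hdom
      exact fun y hy => hdom.2 y hy
    rw [koppelen_eq_map xh g hg hbg hb, koppelen_alt_eq_map]
    apply List.map_congr_left
    intro x _
    rw [pvBestB_eq g hg x]
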